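-- pv_equiv track=rewrite | github.com/chenyueg/leetcode | 2391_Minimum_Amount_of_Time_to_Collect_Garbage/chenyueg.py | garbageCollection
-- ===== SOURCE A (Python) =====
-- from typing import List
--
-- def garbageCollection(garbage: List[str], travel: List[int]) -> int:
--     time = 0
--     m, p, g = False, False, False
--
--     for each in garbage:
--         time += len(each)
--     for i in range(len(travel), 0, -1):
--         m = m or 'M' in garbage[i]
--         p = p or 'P' in garbage[i]
--         g = g or 'G' in garbage[i]
--         time += travel[i-1] * (m + p + g)
--     return time
-- ===== SOURCE B (Python) =====
-- from typing import List
--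
-- def garbageCollection(garbage: List[str], travel: List[int]) -> int:
--     time = sum(len(s) for s in garbage)
--     for c in 'MPG':
--         last = 0
--         for i in range(1, len(travel) + 1):
--             if c in garbage[i]:
--                 last = i
--         time += sum(travel[:last])
--     return time
-- ===== Notes on version B (the rewrite author's own statement) =====
-- stated objective: idiomatic
-- what changed: Replaces the reverse pass that accumulates three booleans and adds travel[i-1]*(m+p+g) at each step by the standard per-type decomposition: total garbage length plus, for each type, the prefix sum of travel up to that type's last occurrence.
import Mathlib
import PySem

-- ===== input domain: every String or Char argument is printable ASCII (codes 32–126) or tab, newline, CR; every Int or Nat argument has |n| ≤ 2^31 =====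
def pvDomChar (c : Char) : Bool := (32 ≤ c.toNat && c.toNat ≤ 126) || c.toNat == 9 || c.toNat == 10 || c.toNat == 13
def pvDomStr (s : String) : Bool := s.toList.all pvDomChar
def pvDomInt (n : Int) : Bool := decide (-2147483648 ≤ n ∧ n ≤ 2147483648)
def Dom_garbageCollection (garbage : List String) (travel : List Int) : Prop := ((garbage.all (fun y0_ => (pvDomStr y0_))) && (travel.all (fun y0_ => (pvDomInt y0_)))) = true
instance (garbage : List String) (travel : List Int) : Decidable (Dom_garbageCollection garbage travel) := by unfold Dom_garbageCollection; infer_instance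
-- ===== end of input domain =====

-- B replaces A's reverse boolean-accumulation pass by the idiomatic per-type decomposition
-- (total garbage length + per type the prefix sum of travel up to its last occurrence); same cost.

-- ===== PORT A =====
def garbageCollection (garbage : List String) (travel : List Int) : Int :=
  let time : Int := garbage.foldl (fun acc s => acc + (PySem.Str.len s : Int)) 0
  let st := (PySem.List.pyRange (travel.length : Int) 0 (-1)).foldl
    (fun (st : Int × Bool × Bool × Bool) i =>
      let gi := PySem.List.pyGetD garbage i ""
      let m := st.2.1 || PySem.Str.isIn "M" gi
      let p := st.2.2.1 || PySem.Str.isIn "P" gi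
      let g := st.2.2.2 || PySem.Str.isIn "G" gi
      (st.1 + PySem.List.pyGetD travel (i - 1) 0 *
        ((if m then (1 : Int) else 0) + (if p then 1 else 0) + (if g then 1 else 0)), m, p, g))
    (time, false, false, false)
  st.1

-- ===== PORT B =====
def garbageCollection_alt (garbage : List String) (travel : List Int) : Int :=
  let time : Int := (garbage.map (fun s => (PySem.Str.len s : Int))).sum
  ["M", "P", "G"].foldl (fun time c =>
    let last : Int := (PySem.List.pyRange 1 ((travel.length : Int) + 1) 1).foldl
      (fun last i => if PySem.Str.isIn c (PySem.List.pyGetD garbage i "") then i else last) 0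
    time + (PySem.List.slice travel none (some last)).sum) time

-- ===== PRECONDITION & SPEC =====
-- Pre_ excludes exactly the inputs where A raises IndexError: a nonempty travel with
-- len(travel) >= len(garbage) makes A read garbage[len(travel)] out of range.
def Pre_garbageCollection (garbage : List String) (travel : List Int) : Prop :=
  travel.length < garbage.length ∨ travel = []
instance (garbage : List String) (travel : List Int) : Decidable (Pre_garbageCollection garbage travel) := by unfold Pre_garbageCollection; infer_instance

def pvWitness_garbageCollection : List String × List Int := (["X", "MG", "P"], [3, 5])

def Spec_garbageCollection (garbage : List String) (travel : List Int) (out : Int) : Prop := out = garbageCollection_alt garbage travel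
instance (garbage : List String) (travel : List Int) (out : Int) : Decidable (Spec_garbageCollection garbage travel out) := by unfold Spec_garbageCollection; infer_instance

-- ===== CLAIM (what is proved, stated in full; the proofs are below) =====
def Claim_equal_garbageCollection : Prop := ∀ (garbage : List String) (travel : List Int), Dom_garbageCollection garbage travel → Pre_garbageCollection garbage travel → Spec_garbageCollection garbage travel (garbageCollection garbage travel)

-- ===== LEMMAS AND PROOFS =====

-- 'c in garbage[k]' at house k (A and B both read a missing house as "", never reached under Pre_)
def pvHas (garbage : List String) (c : String) (k : Nat) : Bool :=
  PySem.Str.isIn c (garbage.getD k "")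

-- last house index in [1, n] whose garbage contains c (0 if none)
def pvLast (garbage : List String) (c : String) : Nat → Nat
  | 0 => 0
  | n + 1 => if pvHas garbage c (n + 1) then n + 1 else pvLast garbage c n

theorem pvLast_le (garbage : List String) (c : String) (n : Nat) : pvLast garbage c n ≤ n := by
  induction n with
  | zero => simp [pvLast]
  | succ n ih => unfold pvLast; split <;> omega

theorem pvLast_upper (garbage : List String) (c : String) (n k : Nat)
    (hk : k ≤ n) (h : pvHas garbage c k = true) : k ≤ pvLast garbage c n := by
  induction n with
  | zero => omega
  | succ n ih =>
    unfold pvLast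
    split
    · omega
    · rename_i h'
      rcases Nat.lt_or_ge k (n + 1) with hlt | hge
      · exact ih (by omega)
      · exact absurd h (by rw [show k = n + 1 by omega]; simp [h'])

theorem pvLast_attain (garbage : List String) (c : String) (n : Nat)
    (h : pvLast garbage c n ≠ 0) : pvHas garbage c (pvLast garbage c n) = true := by
  induction n with
  | zero => simp [pvLast] at h
  | succ n ih =>
    unfold pvLast at h ⊢
    split
    · rename_i h'; exact h'
    · exact ih (by simpa [pvLast, *] using h)

theorem flag_eq (garbage : List String) (c : String) (n j : Nat) (hj : j < n) :
    (decide (j + 1 < pvLast garbage c n) || PySem.Str.isIn c (garbage.getD (j + 1) "")) =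
      decide (j < pvLast garbage c n) := by
  cases hh : pvHas garbage c (j + 1) with
  | true =>
    have := pvLast_upper garbage c n (j + 1) (by omega) hh
    unfold pvHas at hh
    rw [hh]
    simp [show j < pvLast garbage c n by omega]
  | false =>
    unfold pvHas at hh
    rw [hh, Bool.or_false, decide_eq_decide]
    rcases eq_or_ne (pvLast garbage c n) (j + 1) with he | hne
    · have ha := pvLast_attain garbage c n (by omega)
      rw [he] at ha; unfold pvHas at ha; rw [hh] at ha; exact absurd ha (by simp)
    · omega

theorem take_min_succ (travel : List Int) (L j : Nat) (hj : j < travel.length) :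
    (travel.take (min L (j + 1))).sum =
      (travel.take (min L j)).sum + (if j < L then travel.getD j 0 else 0) := by
  by_cases h : j < L
  · rw [if_pos h, show min L (j + 1) = j + 1 by omega, show min L j = j by omega,
      List.sum_take_succ travel j hj, List.getD_eq_getElem travel 0 hj]
  · rw [if_neg h, show min L (j + 1) = L by omega, show min L j = L by omega, add_zero]

theorem loopA_inv (garbage : List String) (travel : List Int) (j : Nat)
    (hj : j ≤ travel.length) (t : Int) :
    ((PySem.List.pyRange (j : Int) 0 (-1)).foldl
      (fun (st : Int × Bool × Bool × Bool) i =>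
        (st.1 + PySem.List.pyGetD travel (i - 1) 0 *
          ((if st.2.1 || PySem.Str.isIn "M" (PySem.List.pyGetD garbage i "") then (1 : Int) else 0) +
           (if st.2.2.1 || PySem.Str.isIn "P" (PySem.List.pyGetD garbage i "") then 1 else 0) +
           (if st.2.2.2 || PySem.Str.isIn "G" (PySem.List.pyGetD garbage i "") then 1 else 0)),
         st.2.1 || PySem.Str.isIn "M" (PySem.List.pyGetD garbage i ""),
         st.2.2.1 || PySem.Str.isIn "P" (PySem.List.pyGetD garbage i ""),
         st.2.2.2 || PySem.Str.isIn "G" (PySem.List.pyGetD garbage i "")))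
      (t, decide (j < pvLast garbage "M" travel.length),
          decide (j < pvLast garbage "P" travel.length),
          decide (j < pvLast garbage "G" travel.length))).1 =
      t + (travel.take (min (pvLast garbage "M" travel.length) j)).sum
        + (travel.take (min (pvLast garbage "P" travel.length) j)).sum
        + (travel.take (min (pvLast garbage "G" travel.length) j)).sum := by
  induction j generalizing t with
  | zero =>
    rw [show ((0 : Nat) : Int) = 0 by norm_num, PySem.List.pyRange_neg_one_eq_nil le_rfl]
    simp
  | succ j ih =>
    have hc : (((j + 1 : Nat)) : Int) = (j : Int) + 1 := by push_cast; ring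
    rw [hc, PySem.List.pyRange_neg_one_cons (by omega), List.foldl_cons]
    have hg : ∀ c, PySem.Str.isIn c (PySem.List.pyGetD garbage ((j : Int) + 1) "")
        = PySem.Str.isIn c (garbage.getD (j + 1) "") := by
      intro c; rw [← hc, PySem.List.pyGetD_natCast]
    have ht : PySem.List.pyGetD travel ((j : Int) + 1 - 1) 0 = travel.getD j 0 := by
      rw [show (j : Int) + 1 - 1 = ((j : Nat) : Int) by ring, PySem.List.pyGetD_natCast]
    simp only [hg,
      flag_eq garbage "M" travel.length j (by omega),
      flag_eq garbage "P" travel.length j (by omega),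
      flag_eq garbage "G" travel.length j (by omega),
      show (j : Int) + 1 - 1 = (j : Int) by ring]
    rw [ih (by omega)]
    rw [take_min_succ travel _ j (by omega), take_min_succ travel _ j (by omega),
        take_min_succ travel _ j (by omega)]
    by_cases hm : j < pvLast garbage "M" travel.length <;>
      by_cases hp : j < pvLast garbage "P" travel.length <;>
        by_cases hG : j < pvLast garbage "G" travel.length <;>
          simp [hm, hp, hG] <;> ring

theorem lastB_eq (garbage : List String) (c : String) (n : Nat) :
    (PySem.List.pyRange 1 ((n : Int) + 1) 1).foldl
      (fun last i => if PySem.Str.isIn c (PySem.List.pyGetD garbage i "") then i else last) 0 =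
      ((pvLast garbage c n : Nat) : Int) := by
  induction n with
  | zero => rw [show ((0 : Nat) : Int) + 1 = 1 by norm_num,
      PySem.List.pyRange_one_eq_nil le_rfl]; simp [pvLast]
  | succ n ih =>
    have hc : (((n + 1 : Nat)) : Int) + 1 = ((n : Int) + 1) + 1 := by push_cast; ring
    rw [hc, PySem.List.pyRange_one_succ_right (by omega), List.foldl_append,
        List.foldl_cons, List.foldl_nil, ih]
    have hg : PySem.Str.isIn c (PySem.List.pyGetD garbage ((n : Int) + 1) "")
        = pvHas garbage c (n + 1) := by
      rw [show (n : Int) + 1 = ((n + 1 : Nat) : Int) by push_cast; ring,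
        PySem.List.pyGetD_natCast]; rfl
    rw [hg, show pvLast garbage c (n + 1)
        = if pvHas garbage c (n + 1) then n + 1 else pvLast garbage c n from rfl]
    by_cases h : pvHas garbage c (n + 1) = true
    · rw [if_pos h, if_pos h]; push_cast; ring
    · rw [if_neg h, if_neg h]

-- ===== VERDICT (by name: the statement is the Claim_ definition above) =====
theorem garbageCollection_spec : Claim_equal_garbageCollection := by
  intro garbage travel _ _
  unfold Spec_garbageCollection
  simp only [garbageCollection, garbageCollection_alt]
  rw [PySem.List.foldl_add]
  have hA := loopA_inv garbage travel travel.length le_rfl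
    (0 + (garbage.map (fun s => (PySem.Str.len s : Int))).sum)
  have hf : ∀ c, decide (travel.length < pvLast garbage c travel.length) = false :=
    fun c => by simp [Nat.not_lt.2 (pvLast_le garbage c travel.length)]
  rw [hf "M", hf "P", hf "G"] at hA
  rw [hA]
  simp only [lastB_eq, List.foldl_cons, List.foldl_nil,
    PySem.List.slice_to _ (Int.natCast_nonneg _), Int.toNat_natCast,
    min_eq_left (pvLast_le garbage _ travel.length)]
  ring
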